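-- pv_equiv track=rewrite | github.com/aorursy/KT_dataset_py | nhutlong2019_fuzzylogic-huynhnhutlong-exercise-2.py | Create_Parameter_Array
-- ===== SOURCE A (Python) =====
-- def Create_Parameter_Array(variable,root):
--
--     n = 2**variable # Số hàng
--
--     m = variable+root # Số cột ban đầu
--
--     flag = 1
--
--     array = [[0 for i in range(m)] for j in range(n)]
--
--     for j in range(m):
--
--         count = 1
--
--         tmp = 1
--
--         for i in range(n):
--
--             if count == flag+1:
--
--                 array[i][j] = 1
--
--                 tmp += 1
--
--                 if (tmp == count):
--
--                     tmp = 1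
--
--                     count = 1
--
--                 continue
--
--             count += 1
--
--         flag *= 2
--
--     return array
-- ===== SOURCE B (Python) =====
-- def Create_Parameter_Array(variable, root):
--     return [[(i >> j) & 1 for j in range(variable + root)]
--             for i in range(2 ** variable)]
-- ===== Notes on version B (the rewrite author's own statement) =====
-- stated objective: simpler
-- what changed: Replaces the per-column flag/count/tmp state-machine sweep over a preallocated zero matrix with a nested comprehension computing each cell independently by the closed-form bit formula (i >> j) & 1.
import Mathlib
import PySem

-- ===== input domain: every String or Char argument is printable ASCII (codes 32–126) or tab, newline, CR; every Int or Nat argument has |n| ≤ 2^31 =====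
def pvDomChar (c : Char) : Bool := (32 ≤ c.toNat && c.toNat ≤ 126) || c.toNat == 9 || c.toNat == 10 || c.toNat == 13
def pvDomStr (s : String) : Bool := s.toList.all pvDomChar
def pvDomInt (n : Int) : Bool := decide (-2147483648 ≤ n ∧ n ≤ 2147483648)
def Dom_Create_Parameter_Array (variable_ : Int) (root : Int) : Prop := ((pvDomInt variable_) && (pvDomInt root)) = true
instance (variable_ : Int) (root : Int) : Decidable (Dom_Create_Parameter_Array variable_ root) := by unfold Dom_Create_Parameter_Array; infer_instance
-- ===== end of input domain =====

-- B replaces A's per-column flag/count/tmp state-machine sweep with a direct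
-- per-cell bit formula (i >> j) & 1 (objective: simpler).

-- ===== PORT A =====
-- one iteration of A's inner `for i in range(n)` loop body; state = (array, count, tmp)
def cpaStep (flag j : Nat) (st : List (List Int) × Nat × Nat) (i : Nat) :
    List (List Int) × Nat × Nat :=
  let (arr, count, tmp) := st
  if count = flag + 1 then
    let arr' := arr.modify i (fun row => row.set j 1)
    let tmp' := tmp + 1
    if tmp' = count then (arr', 1, 1) else (arr', count, tmp')
  else (arr, count + 1, tmp)

def Create_Parameter_Array (variable_ : Int) (root : Int) : List (List Int) :=
  let n : Nat := 2 ^ variable_.toNat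
  let m : Nat := (variable_ + root).toNat
  let array := List.replicate n (List.replicate m (0 : Int))
  ((List.range m).foldl
      (fun st j => (((List.range n).foldl (cpaStep st.2 j) (st.1, 1, 1)).1, st.2 * 2))
      (array, 1)).1

-- ===== PORT B =====
def Create_Parameter_Array_alt (variable_ : Int) (root : Int) : List (List Int) :=
  (List.range (2 ^ variable_.toNat)).map (fun i =>
    (List.range ((variable_ + root).toNat)).map (fun j => (((i >>> j) &&& 1 : Nat) : Int)))

-- ===== PRECONDITION & SPEC =====
-- A raises TypeError when variable < 0 (2**variable is then a float, rejected by range)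
def Pre_Create_Parameter_Array (variable_ : Int) (root : Int) : Prop := 0 ≤ variable_
instance (variable_ : Int) (root : Int) : Decidable (Pre_Create_Parameter_Array variable_ root) := by unfold Pre_Create_Parameter_Array; infer_instance
def pvWitness_Create_Parameter_Array : Int × Int := (2, 1)

def Spec_Create_Parameter_Array (variable_ : Int) (root : Int) (out : List (List Int)) : Prop := out = Create_Parameter_Array_alt variable_ root
instance (variable_ : Int) (root : Int) (out : List (List Int)) : Decidable (Spec_Create_Parameter_Array variable_ root out) := by unfold Spec_Create_Parameter_Array; infer_instance

-- ===== CLAIM (what is proved, stated in full; the proofs are below) =====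
def Claim_equal_Create_Parameter_Array : Prop := ∀ (variable_ : Int) (root : Int), Dom_Create_Parameter_Array variable_ root → Pre_Create_Parameter_Array variable_ root → Spec_Create_Parameter_Array variable_ root (Create_Parameter_Array variable_ root)

-- ===== LEMMAS AND PROOFS =====

-- model of A's array after the first k rows of column j have been swept with flag f
def touch (f j k : Nat) (arr : List (List Int)) : List (List Int) :=
  arr.mapIdx (fun i row => if i < k ∧ f ≤ i % (f * 2) then row.set j 1 else row)

-- closed form of A's (count, tmp) state before processing row k
def stC (f k : Nat) : Nat := if k % (f * 2) < f then k % (f * 2) + 1 else f + 1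
def stT (f k : Nat) : Nat := if k % (f * 2) < f then 1 else k % (f * 2) - f + 1

-- model row / array after the first k columns are done
def rowF (m k i : Nat) : List Int :=
  (List.range m).map (fun c => if 2 ^ c ≤ i % (2 ^ c * 2) ∧ c < k then 1 else 0)
def arrF (n m k : Nat) : List (List Int) := (List.range n).map (rowF m k)

lemma touch_zero (f j : Nat) (arr : List (List Int)) : touch f j 0 arr = arr := by
  unfold touch
  apply List.ext_getElem?
  intro i
  simp [List.getElem?_mapIdx]

lemma touch_succ_no (f j k : Nat) (arr : List (List Int)) (h : k % (f * 2) < f) :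
    touch f j (k + 1) arr = touch f j k arr := by
  unfold touch
  apply List.ext_getElem?
  intro i
  simp only [List.getElem?_mapIdx]
  rcases arr[i]? with _ | row
  · rfl
  · simp only [Option.map_some]
    congr 1
    by_cases hb : f ≤ i % (f * 2)
    · by_cases hik : i < k
      · simp [hik, hb, Nat.lt_succ_of_lt hik]
      · have hik' : ¬ i < k + 1 := by
          rcases Nat.lt_or_ge i (k+1) with h1 | h1
          · intro _
            have : i = k := by omega
            subst this
            omega
          · omega
        simp [hik, hik']
    · simp [hb]

lemma touch_succ_yes (f j k : Nat) (arr : List (List Int)) (h : f ≤ k % (f * 2)) :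
    touch f j (k + 1) arr = (touch f j k arr).modify k (fun row => row.set j 1) := by
  unfold touch
  apply List.ext_getElem?
  intro i
  simp only [List.getElem?_mapIdx, List.getElem?_modify]
  rcases arr[i]? with _ | row
  · rfl
  · simp only [Option.map_some]
    congr 1
    by_cases hik : i = k
    · subst hik
      simp [h]
    · have : (i < k + 1) = (i < k) := by
        apply propext; constructor <;> intro <;> omega
      simp [Ne.symm hik, this]

lemma mod_succ (f k : Nat) (hf : 1 ≤ f) :
    (k + 1) % (f * 2) = if k % (f * 2) + 1 = f * 2 then 0 else k % (f * 2) + 1 := by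
  have hm : 0 < f * 2 := by omega
  have h1 : (k + 1) % (f * 2) = (k % (f * 2) + 1) % (f * 2) := by
    rw [Nat.add_mod, Nat.mod_eq_of_lt (show (1:Nat) < f * 2 by omega)]
  rw [h1]
  have hr : k % (f * 2) < f * 2 := Nat.mod_lt _ hm
  by_cases he : k % (f * 2) + 1 = f * 2
  · rw [he, Nat.mod_self]
    simp
  · rw [Nat.mod_eq_of_lt (by omega)]
    simp [he]

lemma inner_inv (f j : Nat) (hf : 1 ≤ f) (arr : List (List Int)) (k : Nat) :
    (List.range k).foldl (cpaStep f j) (arr, 1, 1) = (touch f j k arr, stC f k, stT f k) := by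
  induction k with
  | zero =>
    simp [touch_zero, stC, stT, Nat.mod_eq_of_lt (show 0 < f * 2 by omega)]
  | succ k ih =>
    rw [List.range_succ, List.foldl_append, ih]
    have hr : k % (f * 2) < f * 2 := Nat.mod_lt _ (by omega)
    have hms := mod_succ f k hf
    simp only [List.foldl_cons, List.foldl_nil, cpaStep]
    by_cases hb : f ≤ k % (f * 2)
    · -- set branch: count = f + 1
      have hc : stC f k = f + 1 := by simp [stC, Nat.not_lt_of_ge hb]
      have ht : stT f k = k % (f * 2) - f + 1 := by simp [stT, Nat.not_lt_of_ge hb]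
      rw [hc, ht]
      by_cases hreset : k % (f * 2) - f + 1 + 1 = f + 1
      · -- tmp reaches count: k % (f*2) = 2f - 1, wraps to 0
        have hwrap : k % (f * 2) + 1 = f * 2 := by omega
        rw [if_pos hreset]
        rw [touch_succ_yes f j k arr hb]
        have h1 : (k + 1) % (f * 2) = 0 := by rw [hms]; simp [hwrap]
        simp [stC, stT, h1, show 0 < f by omega]
      · have hnw : ¬ (k % (f * 2) + 1 = f * 2) := by omega
        rw [if_neg hreset]
        rw [touch_succ_yes f j k arr hb]
        have h1 : (k + 1) % (f * 2) = k % (f * 2) + 1 := by rw [hms]; simp [hnw]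
        have h2 : ¬ (k % (f * 2) + 1 < f) := by omega
        simp only [stC, stT, h1, if_neg h2, if_true, Prod.mk.injEq]
        refine ⟨?_, ?_, by omega⟩ <;> trivial
    · -- counting branch
      have hblt : k % (f * 2) < f := by omega
      have hc : stC f k = k % (f * 2) + 1 := by simp [stC, hblt]
      have ht : stT f k = 1 := by simp [stT, hblt]
      rw [hc, ht]
      have hne : ¬ (k % (f * 2) + 1 = f + 1) := by omega
      rw [if_neg hne]
      rw [touch_succ_no f j k arr hblt]
      have hnw : ¬ (k % (f * 2) + 1 = f * 2) := by omega
      have h1 : (k + 1) % (f * 2) = k % (f * 2) + 1 := by rw [hms]; simp [hnw]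
      by_cases h2 : k % (f * 2) + 1 < f
      · simp [stC, stT, h1, h2]
      · have heq : k % (f * 2) + 1 = f := by omega
        simp [stC, stT, h1, heq]

lemma rowF_succ (m k i : Nat) (hk : k < m) :
    rowF m (k + 1) i =
      if 2 ^ k ≤ i % (2 ^ k * 2) then (rowF m k i).set k 1 else rowF m k i := by
  unfold rowF
  by_cases hb : 2 ^ k ≤ i % (2 ^ k * 2)
  · rw [if_pos hb]
    apply List.ext_getElem?
    intro c
    by_cases hck : c = k
    · subst hck
      simp [hk, hb]
    · have hcc : (c ≤ k) = (c < k) := propext (by omega)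
      by_cases hcm : c < m
      · rw [List.getElem?_set]
        simp only [List.getElem?_map, List.getElem?_range hcm, Option.map_some]
        rw [if_neg (Ne.symm hck)]
        simp [hcc]
      · have hnone : (List.range m)[c]? = none := by simp; omega
        simp [hnone, Ne.symm hck]
  · rw [if_neg hb]
    refine List.map_congr_left (fun c hc => ?_)
    by_cases hck : c = k
    · subst hck
      simp [hb]
    · have hcc : (c ≤ k) = (c < k) := propext (by omega)
      simp [hcc]

lemma arrF_succ (n m k : Nat) (hk : k < m) :
    touch (2 ^ k) k n (arrF n m k) = arrF n m (k + 1) := by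
  unfold touch arrF
  apply List.ext_getElem?
  intro i
  simp only [List.getElem?_mapIdx, List.getElem?_map]
  by_cases hin : i < n
  · rw [List.getElem?_range hin]
    simp only [Option.map_some]
    congr 1
    rw [rowF_succ m k i hk]
    by_cases hb : 2 ^ k ≤ i % (2 ^ k * 2)
    · simp [hb, hin]
    · simp [hb]
  · have : (List.range n)[i]? = none := by simp; omega
    simp [this]

lemma arrF_zero (n m : Nat) :
    List.replicate n (List.replicate m (0 : Int)) = arrF n m 0 := by
  unfold arrF rowF
  symm
  rw [List.eq_replicate_iff]
  constructor
  · simp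
  · intro row hrow
    rw [List.mem_map] at hrow
    obtain ⟨i, _, hi⟩ := hrow
    rw [← hi]
    rw [List.eq_replicate_iff]
    simp

lemma outer_inv (n m : Nat) (k : Nat) (hk : k ≤ m) :
    (List.range k).foldl
        (fun st j => (((List.range n).foldl (cpaStep st.2 j) (st.1, 1, 1)).1, st.2 * 2))
        (arrF n m 0, 1) = (arrF n m k, 2 ^ k) := by
  induction k with
  | zero => simp
  | succ k ih =>
    have hk' : k ≤ m := by omega
    rw [List.range_succ, List.foldl_append, ih hk']
    simp only [List.foldl_cons, List.foldl_nil]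
    rw [inner_inv (2 ^ k) k (Nat.one_le_two_pow) (arrF n m k) n]
    rw [arrF_succ n m k (by omega)]
    rw [pow_succ]

lemma bit_cell (i c : Nat) :
    (((i >>> c) &&& 1 : Nat) : Int) = if 2 ^ c ≤ i % (2 ^ c * 2) then 1 else 0 := by
  rw [Nat.and_one_is_mod, Nat.shiftRight_eq_div_pow]
  rw [← Nat.mod_mul_right_div_self i (2 ^ c) 2]
  have hr : i % (2 ^ c * 2) < 2 ^ c * 2 := Nat.mod_lt _ (by positivity)
  by_cases hb : 2 ^ c ≤ i % (2 ^ c * 2)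
  · rw [if_pos hb]
    have h1 : i % (2 ^ c * 2) / 2 ^ c = 1 := Nat.div_eq_of_lt_le (by omega) (by omega)
    rw [h1]
    rfl
  · rw [if_neg hb]
    have h1 : i % (2 ^ c * 2) / 2 ^ c = 0 := Nat.div_eq_of_lt (by omega)
    rw [h1]
    rfl

-- ===== VERDICT (by name: the statement is the Claim_ definition above) =====
theorem Create_Parameter_Array_spec : Claim_equal_Create_Parameter_Array := by
  intro v r _ _
  unfold Spec_Create_Parameter_Array Create_Parameter_Array Create_Parameter_Array_alt
  simp only
  rw [arrF_zero, outer_inv _ _ _ (le_refl _)]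
  unfold arrF rowF
  refine List.map_congr_left (fun i hi => List.map_congr_left (fun c hc => ?_))
  rw [bit_cell]
  simp only [List.mem_range] at hc
  simp [hc]
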